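-- pv_equiv track=rewrite | github.com/Illiadan/AlgoExpert | Medium_MinimumChractersForWords/app.py | minimumCharactersForWords
-- ===== SOURCE A (Python) =====
-- def minimumCharactersForWords(words):
--     # Write your code here.
--     chars = {}
--     for word in words:
--         for char in word:
--             x = word.count(char)
--             if char not in chars:
--                 chars[char] = x
--             elif chars[char] < x:
--                 chars[char] = x
--     out = []
--     for key in chars.keys():
--         for y in range(chars[key]):
--             out.append(key)
--     return out
-- ===== SOURCE B (Python) =====
-- def minimumCharactersForWords(words):
--     # Build the ordered index of distinct characters first, then one
--     # char-outer pass computing each character's max count across words.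
--     index = list(dict.fromkeys(c for w in words for c in w))
--     out = []
--     for char in index:
--         out += [char] * max((w.count(char) for w in words), default=0)
--     return out
-- ===== Notes on version B (the rewrite author's own statement) =====
-- stated objective: alternative
-- what changed: Transposed loop nesting: B first builds the ordered distinct-character index with dict.fromkeys, then per character takes max(word.count) across words and expands, instead of A's word-outer dict of running maxima followed by a key expansion loop.
import Mathlib
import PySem

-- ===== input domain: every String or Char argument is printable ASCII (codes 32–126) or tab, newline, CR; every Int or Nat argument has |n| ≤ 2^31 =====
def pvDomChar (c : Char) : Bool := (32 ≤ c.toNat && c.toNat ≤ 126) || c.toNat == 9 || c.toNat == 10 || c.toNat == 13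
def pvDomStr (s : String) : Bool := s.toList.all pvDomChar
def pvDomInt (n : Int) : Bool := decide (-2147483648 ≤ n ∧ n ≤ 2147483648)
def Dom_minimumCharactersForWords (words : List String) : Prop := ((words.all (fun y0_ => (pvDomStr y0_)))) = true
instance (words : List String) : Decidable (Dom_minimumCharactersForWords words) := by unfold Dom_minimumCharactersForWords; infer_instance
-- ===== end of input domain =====

-- B transposes the loop nesting: it builds the ordered distinct-character index first,
-- then computes each character's max count across all words (objective: alternative).


-- ===== PORT A =====
-- body of A's inner loop: 'x = word.count(char); if char not in chars: chars[char] = x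
-- elif chars[char] < x: chars[char] = x'  (counts are non-negative, kept as Nat)
def pvInnerA (word : String) (d : PySem.Dict Char Nat) (char : Char) : PySem.Dict Char Nat :=
  let x : Nat := word.toList.count char
  match d.get? char with
  | none => d.insert char x
  | some v => if v < x then d.insert char x else d

def minimumCharactersForWords (words : List String) : List String :=
  let chars : PySem.Dict Char Nat :=
    words.foldl (fun d word => word.toList.foldl (pvInnerA word) d) PySem.Dict.empty
  chars.keys.foldl (fun out key =>
    (PySem.List.pyRange 0 (chars.getD key 0 : Int) 1).foldl
      (fun out _ => out ++ [String.singleton key]) out) []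

-- ===== PORT B =====
-- index = list(dict.fromkeys(...)); then per char: out += [char] * max(counts, default=0)
def minimumCharactersForWords_alt (words : List String) : List String :=
  let index : List Char := PySem.List.dedup (words.flatMap String.toList)
  index.foldl (fun out char =>
    out ++ List.replicate (((words.map (fun w => w.toList.count char)).max?).getD 0)
      (String.singleton char)) []

-- ===== PRECONDITION & SPEC =====
def Spec_minimumCharactersForWords (words : List String) (out : List String) : Prop := out = minimumCharactersForWords_alt words
instance (words : List String) (out : List String) : Decidable (Spec_minimumCharactersForWords words out) := by unfold Spec_minimumCharactersForWords; infer_instance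

-- ===== CLAIM (what is proved, stated in full; the proofs are below) =====
def Claim_equal_minimumCharactersForWords : Prop := ∀ (words : List String), Dom_minimumCharactersForWords words → Spec_minimumCharactersForWords words (minimumCharactersForWords words)

-- ===== LEMMAS AND PROOFS =====

-- one inner update appends the char to the key order if new, else keeps the order
theorem pvInnerA_keys (word : String) (d : PySem.Dict Char Nat) (char : Char) :
    (pvInnerA word d char).keys = PySem.Set.add d.keys char := by
  unfold pvInnerA
  cases h : d.get? char with
  | none =>
    have hc : d.contains char = false := by
      rw [PySem.Dict.get?_eq_none_iff_contains] at h; exact h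
    have hm : char ∉ d.keys := by
      intro hm
      rw [← PySem.Dict.contains_iff_mem_keys] at hm
      simp [hc] at hm
    simp [PySem.Dict.keys_insert_of_not_contains _ _ hc, PySem.Set.add_of_not_mem hm]
  | some v =>
    have hc : d.contains char = true := by
      rw [PySem.Dict.contains_eq_isSome_get?, h]; rfl
    have hm : char ∈ d.keys := (PySem.Dict.contains_iff_mem_keys d char).mp hc
    by_cases hv : v < word.toList.count char
    · simp [hv, PySem.Dict.keys_insert_of_contains _ _ hc, PySem.Set.add_of_mem hm]
    · simp [hv, PySem.Set.add_of_mem hm]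

-- one inner update raises the stored value to the max with this word's count
theorem pvInnerA_getD (word : String) (d : PySem.Dict Char Nat) (char c : Char) :
    (pvInnerA word d char).getD c 0 =
      if c = char then max (d.getD c 0) (word.toList.count char) else d.getD c 0 := by
  unfold pvInnerA
  cases h : d.get? char with
  | none =>
    have h0 : d.getD char 0 = 0 := PySem.Dict.getD_of_get?_eq_none _ _ h
    by_cases hc : c = char
    · subst hc; simp [PySem.Dict.getD_insert_self, h0]
    · simp [hc, PySem.Dict.getD_insert_of_ne _ _ _ hc]
  | some v =>
    have hv0 : d.getD char 0 = v := PySem.Dict.getD_of_get?_eq_some _ _ h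
    by_cases hlt : v < word.toList.count char
    · by_cases hc : c = char
      · subst hc; simp [hlt, PySem.Dict.getD_insert_self, hv0]; omega
      · simp [hlt, hc, PySem.Dict.getD_insert_of_ne _ _ _ hc]
    · by_cases hc : c = char
      · subst hc; simp [hlt, hv0]; omega
      · simp [hlt, hc]

theorem pvInner_foldl_getD (word : String) (cs : List Char) (d : PySem.Dict Char Nat) (c : Char) :
    (cs.foldl (pvInnerA word) d).getD c 0 =
      if c ∈ cs then max (d.getD c 0) (word.toList.count c) else d.getD c 0 := by
  induction cs generalizing d with
  | nil => simp
  | cons char cs ih =>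
    simp only [List.foldl_cons, ih, pvInnerA_getD, List.mem_cons]
    by_cases h1 : c = char
    · subst h1
      by_cases h2 : c ∈ cs <;> simp [h2]
    · by_cases h2 : c ∈ cs <;> simp [h1, h2]

theorem pvInner_foldl_keys (word : String) (cs : List Char) (d : PySem.Dict Char Nat) :
    (cs.foldl (pvInnerA word) d).keys = PySem.Set.update d.keys cs := by
  induction cs generalizing d with
  | nil => simp [PySem.Set.update_nil]
  | cons char cs ih =>
    simp only [List.foldl_cons, ih, pvInnerA_keys, PySem.Set.update_cons]

-- A's dict value at c is the running max of the per-word counts of c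
theorem pvBuild_getD (words : List String) (d : PySem.Dict Char Nat) (c : Char) :
    (words.foldl (fun d word => word.toList.foldl (pvInnerA word) d) d).getD c 0 =
      (words.map (fun w => w.toList.count c)).foldl max (d.getD c 0) := by
  induction words generalizing d with
  | nil => simp
  | cons w ws ih =>
    simp only [List.foldl_cons, ih, List.map_cons, pvInner_foldl_getD]
    by_cases h : c ∈ w.toList
    · simp [h]
    · simp [h, List.count_eq_zero.mpr h]

-- A's dict key order is the first-seen order of all characters
theorem pvBuild_keys (words : List String) (d : PySem.Dict Char Nat) :
    (words.foldl (fun d word => word.toList.foldl (pvInnerA word) d) d).keys =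
      PySem.Set.update d.keys (words.flatMap String.toList) := by
  induction words generalizing d with
  | nil => simp [PySem.Set.update_nil]
  | cons w ws ih =>
    simp only [List.foldl_cons, ih, pvInner_foldl_keys, List.flatMap_cons,
      PySem.Set.update_append]

-- 'for y in range(n): out.append(s)' appends n copies of s
theorem pv_foldl_append_const {α : Type} (s : α) (l : List Int) (out : List α) :
    l.foldl (fun out _ => out ++ [s]) out = out ++ List.replicate l.length s := by
  induction l generalizing out with
  | nil => simp
  | cons a l ih => simp [ih, List.replicate_succ, List.append_assoc]

theorem pv_max?_getD (l : List Nat) : l.max?.getD 0 = l.foldl max 0 := by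
  cases l with
  | nil => rfl
  | cons a l => simp [List.max?]

-- ===== VERDICT (by name: the statement is the Claim_ definition above) =====
theorem minimumCharactersForWords_spec : Claim_equal_minimumCharactersForWords := by
  intro words _
  unfold Spec_minimumCharactersForWords minimumCharactersForWords minimumCharactersForWords_alt
  simp only []
  have hkeys : (words.foldl (fun d word => word.toList.foldl (pvInnerA word) d)
      PySem.Dict.empty).keys = PySem.List.dedup (words.flatMap String.toList) := by
    rw [pvBuild_keys]
    simp [PySem.Set.update_nil_left]
  rw [hkeys]
  apply PySem.List.foldl_congr_mem
  intro out key _hk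
  rw [pv_foldl_append_const, PySem.List.length_pyRange_one]
  have hv : (List.foldl (fun d word => List.foldl (pvInnerA word) d word.toList) PySem.Dict.empty words).getD key 0 =
      (List.map (fun w => List.count key w.toList) words).max?.getD 0 := by
    rw [pv_max?_getD, pvBuild_getD]
    simp
  simp [hv]
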